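-- pv_equiv track=rewrite | github.com/minh-stakc/resume-tailor | src/skill_ranker.py | rank_skills
-- ===== SOURCE A (Python) =====
-- def rank_skills(skills: dict, jd_analysis: dict) -> dict:
--     """
--     Reorder each skill category so JD-relevant skills appear first.
--     Returns a new skills dict with the same categories but reordered lists.
--     """
--     # Build relevance set (lowercased)
--     primary = {s.lower() for s in jd_analysis.get("primary_skills", [])}
--     secondary = {s.lower() for s in jd_analysis.get("secondary_skills", [])}
--     domain = {s.lower() for s in jd_analysis.get("domain_keywords", [])}
--
--     def score_skill(skill: str) -> int:
--         s = skill.lower()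
--         if s in primary:
--             return 3
--         if s in secondary:
--             return 2
--         if s in domain:
--             return 1
--         # Partial match: check if any keyword is a substring of the skill
--         for kw in primary:
--             if kw in s or s in kw:
--                 return 2
--         for kw in secondary | domain:
--             if kw in s or s in kw:
--                 return 1
--         return 0
--
--     ranked = {}
--     for category, skill_list in skills.items():
--         if not isinstance(skill_list, list):
--             ranked[category] = skill_list
--             continue
--         ranked[category] = sorted(skill_list, key=lambda s: -score_skill(s))
--
--     return ranked
-- ===== SOURCE B (Python) =====
-- def rank_skills(skills: dict, jd_analysis: dict) -> dict:
--     """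
--     Reorder each skill category so JD-relevant skills appear first.
--     Bucket version: one pass per list into four score buckets (3,2,1,0),
--     concatenated high-to-low; append order preserves ties like a stable sort.
--     """
--     primary = {s.lower() for s in jd_analysis.get("primary_skills", [])}
--     secondary = {s.lower() for s in jd_analysis.get("secondary_skills", [])}
--     domain = {s.lower() for s in jd_analysis.get("domain_keywords", [])}
--
--     def score_skill(skill: str) -> int:
--         s = skill.lower()
--         if s in primary:
--             return 3
--         if s in secondary:
--             return 2
--         if s in domain:
--             return 1
--         for kw in primary:
--             if kw in s or s in kw:
--                 return 2
--         for kw in secondary | domain: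
--             if kw in s or s in kw:
--                 return 1
--         return 0
--
--     ranked = {}
--     for category, skill_list in skills.items():
--         if not isinstance(skill_list, list):
--             ranked[category] = skill_list
--             continue
--         buckets = {3: [], 2: [], 1: [], 0: []}
--         for s in skill_list:
--             buckets[score_skill(s)].append(s)
--         ranked[category] = buckets[3] + buckets[2] + buckets[1] + buckets[0]
--     return ranked
-- ===== Notes on version B (the rewrite author's own statement) =====
-- stated objective: alternative
-- what changed: Replaces the per-category stable sort by key -score_skill with a single pass that appends each skill into one of four score buckets (3,2,1,0) and concatenates them high-to-low, which preserves tie order exactly like the stable sort; score_skill and the dict rebuild are unchanged.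
import Mathlib
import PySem

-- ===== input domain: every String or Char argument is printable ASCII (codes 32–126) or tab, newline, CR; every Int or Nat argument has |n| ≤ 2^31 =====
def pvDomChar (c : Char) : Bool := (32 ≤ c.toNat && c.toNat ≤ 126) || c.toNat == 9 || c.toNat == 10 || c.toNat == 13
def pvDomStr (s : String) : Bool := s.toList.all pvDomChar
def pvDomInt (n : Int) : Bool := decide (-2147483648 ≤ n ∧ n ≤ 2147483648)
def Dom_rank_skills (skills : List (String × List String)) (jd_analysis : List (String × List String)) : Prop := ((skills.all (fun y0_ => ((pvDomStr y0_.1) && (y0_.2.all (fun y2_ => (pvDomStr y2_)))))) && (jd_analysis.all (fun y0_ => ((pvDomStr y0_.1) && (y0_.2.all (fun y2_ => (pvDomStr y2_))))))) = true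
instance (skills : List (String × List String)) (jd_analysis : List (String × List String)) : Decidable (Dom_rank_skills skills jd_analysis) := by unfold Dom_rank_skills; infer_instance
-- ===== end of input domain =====

-- B replaces the per-category stable sort by key -score with a single pass into four
-- score buckets (3,2,1,0) concatenated high-to-low; score_skill and the dict rebuild
-- are unchanged (objective: alternative).

-- ===== PORT A =====
-- score_skill: the inner helper, closed over the three lowercased keyword sets.
-- The Python 'for kw in <set>' loops return a constant on the first hit, so the
-- result is independent of the set's iteration order; ported as Set-order-
-- independent List.any over the set's elements.
def scoreSkill (primary secondary domain : PySem.Set String) (skill : String) : Int :=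
  let s := PySem.Str.lower skill
  if PySem.Set.contains primary s then 3
  else if PySem.Set.contains secondary s then 2
  else if PySem.Set.contains domain s then 1
  else if primary.any (fun kw => PySem.Str.isIn kw s || PySem.Str.isIn s kw) then 2
  else if (PySem.Set.union secondary domain).any (fun kw => PySem.Str.isIn kw s || PySem.Str.isIn s kw) then 1
  else 0

def rank_skills (skills : List (String × List String)) (jd_analysis : List (String × List String)) : List (String × List String) :=
  let jd := PySem.Dict.mk jd_analysis
  let primary := PySem.Set.ofList ((jd.getD "primary_skills" []).map PySem.Str.lower)
  let secondary := PySem.Set.ofList ((jd.getD "secondary_skills" []).map PySem.Str.lower)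
  let domain := PySem.Set.ofList ((jd.getD "domain_keywords" []).map PySem.Str.lower)
  -- the non-list passthrough branch cannot fire: every value is a list by type
  let ranked := skills.foldl
    (fun ranked p =>
      ranked.insert p.1 (PySem.List.sorted p.2 (fun s => -(scoreSkill primary secondary domain s))))
    PySem.Dict.empty
  ranked.items

-- ===== PORT B =====
-- one pass per list into four buckets, concatenated high-to-low
def bucketStep (score : String → Int) (b : List String × List String × List String × List String)
    (s : String) : List String × List String × List String × List String :=
  let sc := score s
  if sc = 3 then (b.1 ++ [s], b.2.1, b.2.2.1, b.2.2.2)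
  else if sc = 2 then (b.1, b.2.1 ++ [s], b.2.2.1, b.2.2.2)
  else if sc = 1 then (b.1, b.2.1, b.2.2.1 ++ [s], b.2.2.2)
  else (b.1, b.2.1, b.2.2.1, b.2.2.2 ++ [s])

def rankList (score : String → Int) (xs : List String) : List String :=
  let b := xs.foldl (bucketStep score) ([], [], [], [])
  b.1 ++ b.2.1 ++ b.2.2.1 ++ b.2.2.2

def rank_skills_alt (skills : List (String × List String)) (jd_analysis : List (String × List String)) : List (String × List String) :=
  let jd := PySem.Dict.mk jd_analysis
  let primary := PySem.Set.ofList ((jd.getD "primary_skills" []).map PySem.Str.lower)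
  let secondary := PySem.Set.ofList ((jd.getD "secondary_skills" []).map PySem.Str.lower)
  let domain := PySem.Set.ofList ((jd.getD "domain_keywords" []).map PySem.Str.lower)
  let ranked := skills.foldl
    (fun ranked p =>
      ranked.insert p.1 (rankList (scoreSkill primary secondary domain) p.2))
    PySem.Dict.empty
  ranked.items

-- ===== PRECONDITION & SPEC =====
def Spec_rank_skills (skills : List (String × List String)) (jd_analysis : List (String × List String)) (out : List (String × List String)) : Prop := out = rank_skills_alt skills jd_analysis
instance (skills : List (String × List String)) (jd_analysis : List (String × List String)) (out : List (String × List String)) : Decidable (Spec_rank_skills skills jd_analysis out) := by unfold Spec_rank_skills; infer_instance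

-- ===== CLAIM (what is proved, stated in full; the proofs are below) =====
def Claim_equal_rank_skills : Prop := ∀ (skills : List (String × List String)) (jd_analysis : List (String × List String)), Dom_rank_skills skills jd_analysis → Spec_rank_skills skills jd_analysis (rank_skills skills jd_analysis)

-- ===== LEMMAS AND PROOFS =====

theorem scoreSkill_bounds (p s d : PySem.Set String) (x : String) :
    0 ≤ scoreSkill p s d x ∧ scoreSkill p s d x ≤ 3 := by
  simp only [scoreSkill]
  split_ifs <;> omega

theorem insertBy_append_not_before {α : Type} (bf : α → α → Bool) (x : α) (ys zs : List α)
    (h : ∀ y ∈ ys, bf x y = false) :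
    PySem.List.insertBy bf x (ys ++ zs) = ys ++ PySem.List.insertBy bf x zs := by
  induction ys with
  | nil => rfl
  | cons y ys ih =>
    have hy : bf x y = false := h y (by simp)
    simp only [List.cons_append, PySem.List.insertBy, hy, Bool.false_eq_true, if_false]
    rw [ih (fun a ha => h a (by simp [ha]))]

theorem insertBy_all_before {α : Type} (bf : α → α → Bool) (x : α) (zs : List α)
    (h : ∀ z ∈ zs, bf x z = true) :
    PySem.List.insertBy bf x zs = x :: zs := by
  cases zs with
  | nil => rfl
  | cons z zs => simp [PySem.List.insertBy, h z (by simp)]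

-- stable sort by key -score, with scores in [0,3], is the four score-filters concatenated
theorem sorted_eq_filters (score : String → Int)
    (hb : ∀ x, 0 ≤ score x ∧ score x ≤ 3) (xs : List String) :
    PySem.List.sorted xs (fun s => -(score s)) =
      xs.filter (fun s => score s == 3) ++ xs.filter (fun s => score s == 2) ++
      xs.filter (fun s => score s == 1) ++ xs.filter (fun s => score s == 0) := by
  rw [PySem.List.sorted_eq_foldl_insertBy]
  induction xs using List.reverseRecOn with
  | nil => rfl
  | append_singleton xs x ih =>
    rw [List.foldl_append, List.foldl_cons, List.foldl_nil, ih]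
    have hmem3 : ∀ y ∈ xs.filter (fun s => score s == 3), score y = 3 := by
      intro y hy; simpa using (List.of_mem_filter hy)
    have hmem2 : ∀ y ∈ xs.filter (fun s => score s == 2), score y = 2 := by
      intro y hy; simpa using (List.of_mem_filter hy)
    have hmem1 : ∀ y ∈ xs.filter (fun s => score s == 1), score y = 1 := by
      intro y hy; simpa using (List.of_mem_filter hy)
    have hmem0 : ∀ y ∈ xs.filter (fun s => score s == 0), score y = 0 := by
      intro y hy; simpa using (List.of_mem_filter hy)
    have hx := hb x
    set bf : String → String → Bool := fun a b => decide (-(score a) < -(score b)) with hbf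
    have hbfT : ∀ a b : String, score b < score a → bf a b = true := by
      intro a b hab; simp only [hbf, decide_eq_true_eq]; omega
    have hbfF : ∀ a b : String, score a ≤ score b → bf a b = false := by
      intro a b hab; simp only [hbf, decide_eq_false_iff_not]; omega
    have hcase : score x = 3 ∨ score x = 2 ∨ score x = 1 ∨ score x = 0 := by omega
    rcases hcase with h | h | h | h
    · rw [List.append_assoc, List.append_assoc,
        insertBy_append_not_before bf x _ _
          (fun y hy => hbfF x y (by rw [h, hmem3 y hy])),
        insertBy_all_before bf x _
          (by intro z hz
              simp only [List.mem_append] at hz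
              rcases hz with hz | hz | hz
              · exact hbfT x z (by rw [h, hmem2 z hz]; omega)
              · exact hbfT x z (by rw [h, hmem1 z hz]; omega)
              · exact hbfT x z (by rw [h, hmem0 z hz]; omega))]
      simp [List.filter_append, h]
    · rw [List.append_assoc,
        insertBy_append_not_before bf x _ _
          (by intro y hy
              simp only [List.mem_append] at hy
              rcases hy with hy | hy
              · exact hbfF x y (by rw [h, hmem3 y hy]; omega)
              · exact hbfF x y (by rw [h, hmem2 y hy])),
        insertBy_all_before bf x _
          (by intro z hz
              simp only [List.mem_append] at hz
              rcases hz with hz | hz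
              · exact hbfT x z (by rw [h, hmem1 z hz]; omega)
              · exact hbfT x z (by rw [h, hmem0 z hz]; omega))]
      simp [List.filter_append, h]
    · rw [insertBy_append_not_before bf x _ _
          (by intro y hy
              simp only [List.mem_append] at hy
              rcases hy with (hy | hy) | hy
              · exact hbfF x y (by rw [h, hmem3 y hy]; omega)
              · exact hbfF x y (by rw [h, hmem2 y hy]; omega)
              · exact hbfF x y (by rw [h, hmem1 y hy])),
        insertBy_all_before bf x _
          (fun z hz => hbfT x z (by rw [h, hmem0 z hz]; omega))]
      simp [List.filter_append, h]
    · rw [PySem.List.insertBy_of_forall_not_before bf x _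
          (by intro y hy
              simp only [List.mem_append] at hy
              rcases hy with ((hy | hy) | hy) | hy
              · exact hbfF x y (by rw [h, hmem3 y hy]; omega)
              · exact hbfF x y (by rw [h, hmem2 y hy]; omega)
              · exact hbfF x y (by rw [h, hmem1 y hy]; omega)
              · exact hbfF x y (by rw [h, hmem0 y hy]))]
      simp [List.filter_append, h]

-- the bucket fold computes the four filters (accumulators generalized)
theorem bucketFold_eq_filters (score : String → Int)
    (hb : ∀ x, 0 ≤ score x ∧ score x ≤ 3) (xs : List String)
    (b3 b2 b1 b0 : List String) :
    xs.foldl (bucketStep score) (b3, b2, b1, b0) =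
      (b3 ++ xs.filter (fun s => score s == 3), b2 ++ xs.filter (fun s => score s == 2),
       b1 ++ xs.filter (fun s => score s == 1), b0 ++ xs.filter (fun s => score s == 0)) := by
  induction xs generalizing b3 b2 b1 b0 with
  | nil => simp
  | cons x xs ih =>
    have hx := hb x
    simp only [List.foldl_cons, bucketStep]
    have hcase : score x = 3 ∨ score x = 2 ∨ score x = 1 ∨ score x = 0 := by omega
    rcases hcase with h | h | h | h <;>
      simp [h, ih]

theorem rankList_eq_sorted (score : String → Int)
    (hb : ∀ x, 0 ≤ score x ∧ score x ≤ 3) (xs : List String) :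
    PySem.List.sorted xs (fun s => -(score s)) = rankList score xs := by
  rw [sorted_eq_filters score hb xs]
  unfold rankList
  rw [bucketFold_eq_filters score hb xs [] [] [] []]
  simp

-- ===== VERDICT (by name: the statement is the Claim_ definition above) =====
theorem rank_skills_spec : Claim_equal_rank_skills := by
  intro skills jd_analysis _
  unfold Spec_rank_skills rank_skills rank_skills_alt
  dsimp only
  congr 1
  apply PySem.List.foldl_congr_mem
  intro ranked p _
  rw [rankList_eq_sorted _ (fun x => scoreSkill_bounds _ _ _ x) p.2]
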